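-- pv_equiv track=rewrite | github.com/lucas-oma/fantastic-router | packages/fantastic_router_core/src/fantastic_router_core/__init__.py | _route_matches_pattern
-- ===== SOURCE A (Python) =====
-- def _route_matches_pattern(route: str, pattern: str) -> bool:
--     """Check if a route matches a pattern (simple implementation)"""
--
--     # Simple pattern matching - could be enhanced with proper regex
--     route_parts = route.strip('/').split('/')
--     pattern_parts = pattern.strip('/').split('/')
--
--     if len(route_parts) != len(pattern_parts):
--         return False
--
--     for route_part, pattern_part in zip(route_parts, pattern_parts):
--         if pattern_part.startswith('{') and pattern_part.endswith('}'):
--             continue  # Variable part, matches anything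
--         elif route_part != pattern_part:
--             return False
--
--     return True
-- ===== SOURCE B (Python) =====
-- def _route_matches_pattern(route: str, pattern: str) -> bool:
--     """Match by simultaneous structural recursion over both segment lists:
--     no explicit length check and no zip -- a length mismatch simply falls
--     into a base case."""
--     def go(rs, ps):
--         if not rs and not ps:
--             return True
--         if not rs or not ps:
--             return False
--         p = ps[0]
--         if (p.startswith('{') and p.endswith('}')) or rs[0] == p:
--             return go(rs[1:], ps[1:])
--         return False
--     return go(route.strip('/').split('/'), pattern.strip('/').split('/'))
-- ===== Notes on version B (the rewrite author's own statement) =====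
-- stated objective: alternative
-- what changed: Replaces A's explicit length check plus zip loop with a simultaneous structural recursion over the two segment lists, where a length mismatch is absorbed by the recursion's base cases instead of being tested up front.
import Mathlib
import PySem

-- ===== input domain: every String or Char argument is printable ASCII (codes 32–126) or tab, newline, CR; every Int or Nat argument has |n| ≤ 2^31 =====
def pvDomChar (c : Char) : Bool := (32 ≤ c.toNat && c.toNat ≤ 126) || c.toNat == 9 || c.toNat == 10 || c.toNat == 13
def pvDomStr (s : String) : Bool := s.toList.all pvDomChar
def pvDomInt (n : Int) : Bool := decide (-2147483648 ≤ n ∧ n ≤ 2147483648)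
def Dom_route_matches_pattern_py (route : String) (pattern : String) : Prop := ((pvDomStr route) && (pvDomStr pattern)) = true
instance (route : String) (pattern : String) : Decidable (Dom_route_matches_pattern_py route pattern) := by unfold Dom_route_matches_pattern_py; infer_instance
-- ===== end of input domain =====

-- B replaces A's explicit length check + zip loop with a simultaneous structural
-- recursion over the two segment lists (alternative decomposition, same cost).

-- ===== PORT A =====
-- the for-loop over zip(route_parts, pattern_parts) with its early 'return False'
def pvLoopA : List (String × String) → Bool
  | [] => true
  | (route_part, pattern_part) :: rest =>
    if PySem.Str.startswith pattern_part "{" && PySem.Str.endswith pattern_part "}" then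
      pvLoopA rest
    else if route_part ≠ pattern_part then
      false
    else
      pvLoopA rest

-- s.strip('/').split('/') with the nonempty separator '/': Chars.splitOn on the code points, exact
def pvParts (s : String) : List String :=
  (PySem.Chars.splitOn (PySem.Str.stripChars s "/").toList ['/']).map String.ofList

def route_matches_pattern_py (route : String) (pattern : String) : Bool :=
  let route_parts := pvParts route
  let pattern_parts := pvParts pattern
  if route_parts.length ≠ pattern_parts.length then false
  else pvLoopA (route_parts.zip pattern_parts)

-- ===== PORT B =====
-- Source B's helper go(rs, ps): recursion on both lists at once
def pvGoB : List String → List String → Bool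
  | [], [] => true
  | [], _ :: _ => false
  | _ :: _, [] => false
  | r :: rs, p :: ps =>
    if (PySem.Str.startswith p "{" && PySem.Str.endswith p "}") || r == p then
      pvGoB rs ps
    else
      false

def route_matches_pattern_py_alt (route : String) (pattern : String) : Bool :=
  pvGoB (pvParts route) (pvParts pattern)

-- ===== PRECONDITION & SPEC =====
def Spec_route_matches_pattern_py (route : String) (pattern : String) (out : Bool) : Prop := out = route_matches_pattern_py_alt route pattern
instance (route : String) (pattern : String) (out : Bool) : Decidable (Spec_route_matches_pattern_py route pattern out) := by unfold Spec_route_matches_pattern_py; infer_instance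

-- ===== CLAIM (what is proved, stated in full; the proofs are below) =====
def Claim_equal_route_matches_pattern_py : Prop := ∀ (route : String) (pattern : String), Dom_route_matches_pattern_py route pattern → Spec_route_matches_pattern_py route pattern (route_matches_pattern_py route pattern)

-- ===== LEMMAS AND PROOFS =====
lemma pvLoopA_eq_goB : ∀ (rs ps : List String),
    (if rs.length ≠ ps.length then false else pvLoopA (rs.zip ps)) = pvGoB rs ps := by
  intro rs
  induction rs with
  | nil => intro ps; cases ps <;> simp [pvLoopA, pvGoB]
  | cons r rs ih =>
    intro ps
    cases ps with
    | nil => simp [pvGoB]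
    | cons p ps =>
      have h := ih ps
      simp only [List.length_cons, ne_eq, add_left_inj, List.zip_cons_cons, pvLoopA, pvGoB]
      by_cases hlen : rs.length = ps.length
      · simp only [hlen, ne_eq, not_true_eq_false, if_false] at h
        by_cases hs : PySem.Chars.startswith p.toList ['{'] = true <;>
          by_cases he : PySem.Chars.endswith p.toList ['}'] = true <;>
          by_cases hrp : r = p <;>
          simp [hlen, hs, he, hrp, h]
      · simp only [hlen, ne_eq, not_false_eq_true, if_true] at h
        by_cases hs : PySem.Chars.startswith p.toList ['{'] = true <;>
          by_cases he : PySem.Chars.endswith p.toList ['}'] = true <;>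
          by_cases hrp : r = p <;>
          simp [hlen, hs, he, hrp, ← h]

-- ===== VERDICT (by name: the statement is the Claim_ definition above) =====
theorem route_matches_pattern_py_spec : Claim_equal_route_matches_pattern_py := by
  intro route pattern _
  unfold Spec_route_matches_pattern_py route_matches_pattern_py route_matches_pattern_py_alt
  exact pvLoopA_eq_goB _ _
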